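-- pv_equiv track=rewrite | github.com/ur-miya/ai-research-assistant | research_agent_with_filter.py | get_category_priority
-- ===== SOURCE A (Python) =====
-- PRIORITY_CATEGORIES = ['cs.LG', 'cs.AI', 'cs.CL', 'cs.CV', 'cs.NE', 'cs.DB', 'cs.IR', 'stat.ML']
--
-- def get_category_priority(categories_str: str) -> int:
--     if not categories_str:
--         return 0
--
--     categories = categories_str.split()
--
--     for i, priority_cat in enumerate(PRIORITY_CATEGORIES):
--         for cat in categories:
--             if cat.startswith(priority_cat):
--                 return len(PRIORITY_CATEGORIES) - i
--
--     return 1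
-- ===== SOURCE B (Python) =====
-- PRIORITY_CATEGORIES = ['cs.LG', 'cs.AI', 'cs.CL', 'cs.CV', 'cs.NE', 'cs.DB', 'cs.IR', 'stat.ML']
--
-- def get_category_priority(categories_str: str) -> int:
--     if not categories_str:
--         return 0
--     ranks = []
--     for cat in categories_str.split():
--         for i, priority_cat in enumerate(PRIORITY_CATEGORIES):
--             if cat.startswith(priority_cat):
--                 ranks.append(len(PRIORITY_CATEGORIES) - i)
--                 break
--     return max(ranks) if ranks else 1
-- ===== Notes on version B (the rewrite author's own statement) =====
-- stated objective: alternative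
-- what changed: A scans PRIORITY_CATEGORIES in priority order and early-returns the rank of the first category matched by any token; B instead computes a rank per token and aggregates with max over all tokens.
import Mathlib
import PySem

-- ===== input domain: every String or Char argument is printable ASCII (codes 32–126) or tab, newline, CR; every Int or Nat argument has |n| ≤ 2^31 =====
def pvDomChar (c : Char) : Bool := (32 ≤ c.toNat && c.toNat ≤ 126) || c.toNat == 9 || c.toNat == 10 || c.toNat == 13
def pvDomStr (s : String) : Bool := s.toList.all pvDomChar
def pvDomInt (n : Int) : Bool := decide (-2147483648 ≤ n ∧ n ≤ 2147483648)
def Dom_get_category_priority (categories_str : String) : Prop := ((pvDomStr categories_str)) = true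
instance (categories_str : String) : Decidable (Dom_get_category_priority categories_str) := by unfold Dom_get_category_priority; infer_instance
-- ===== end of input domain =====

-- B changes the decomposition: instead of A's priority-first scan with early return, B
-- computes a rank per token and aggregates with max (same cost; objective: alternative).

def PRIORITY_CATEGORIES : List String :=
  ["cs.LG", "cs.AI", "cs.CL", "cs.CV", "cs.NE", "cs.DB", "cs.IR", "stat.ML"]

-- ===== PORT A =====
-- inner 'for cat in categories: if cat.startswith(priority_cat): return …' (did any token match?)
def aInner (cats : List String) (p : String) : Bool :=
  match cats with
  | [] => false
  | c :: rest => if PySem.Str.startswith c p then true else aInner rest p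

-- outer 'for i, priority_cat in enumerate(PRIORITY_CATEGORIES)' with early return
def aOuter (cats : List String) : List (Int × String) → Int
  | [] => 1
  | (i, p) :: rest =>
      if aInner cats p then (PRIORITY_CATEGORIES.length : Int) - i
      else aOuter cats rest

def get_category_priority (categories_str : String) : Int :=
  if categories_str = "" then 0
  else aOuter (PySem.Str.split₀ categories_str) (PySem.List.enumerate PRIORITY_CATEGORIES)

-- ===== PORT B =====
-- inner 'for i, priority_cat in enumerate(PRIORITY_CATEGORIES): … break' (rank of one token)
def bRank (cat : String) : List (Int × String) → Option Int
  | [] => none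
  | (i, p) :: rest =>
      if PySem.Str.startswith cat p then some ((PRIORITY_CATEGORIES.length : Int) - i)
      else bRank cat rest

-- 'ranks = []; for cat in …: … ranks.append(…)'
def bRanks : List String → List Int
  | [] => []
  | c :: rest =>
      match bRank c (PySem.List.enumerate PRIORITY_CATEGORIES) with
      | some r => r :: bRanks rest
      | none => bRanks rest

def get_category_priority_alt (categories_str : String) : Int :=
  if categories_str = "" then 0
  else
    match PySem.List.max? (bRanks (PySem.Str.split₀ categories_str)) (fun x => x) with
    | some m => m
    | none => 1

-- ===== PRECONDITION & SPEC =====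
def Spec_get_category_priority (categories_str : String) (out : Int) : Prop := out = get_category_priority_alt categories_str
instance (categories_str : String) (out : Int) : Decidable (Spec_get_category_priority categories_str out) := by unfold Spec_get_category_priority; infer_instance

-- ===== CLAIM (what is proved, stated in full; the proofs are below) =====
def Claim_equal_get_category_priority : Prop := ∀ (categories_str : String), Dom_get_category_priority categories_str → Spec_get_category_priority categories_str (get_category_priority categories_str)

-- ===== LEMMAS AND PROOFS =====

-- generalized countdown forms of both loops, for induction over the priority list
def aOuterG (cats : List String) : Int → List String → Int
  | _, [] => 1
  | r, p :: ps => if aInner cats p then r else aOuterG cats (r - 1) ps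

def bRankG (cat : String) : Int → List String → Option Int
  | _, [] => none
  | r, p :: ps => if PySem.Str.startswith cat p then some r else bRankG cat (r - 1) ps

def bRanksG (r : Int) (ps : List String) : List String → List Int
  | [] => []
  | c :: rest =>
      match bRankG c r ps with
      | some v => v :: bRanksG r ps rest
      | none => bRanksG r ps rest

theorem aOuter_eq_G (cats : List String) :
    aOuter cats (PySem.List.enumerate PRIORITY_CATEGORIES) = aOuterG cats 8 PRIORITY_CATEGORIES := by
  norm_num [aOuter, aOuterG, PRIORITY_CATEGORIES, PySem.List.enumerate]

theorem bRank_eq_G (c : String) :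
    bRank c (PySem.List.enumerate PRIORITY_CATEGORIES) = bRankG c 8 PRIORITY_CATEGORIES := by
  norm_num [bRank, bRankG, PRIORITY_CATEGORIES, PySem.List.enumerate]

theorem bRanks_eq_G (cats : List String) :
    bRanks cats = bRanksG 8 PRIORITY_CATEGORIES cats := by
  induction cats with
  | nil => rfl
  | cons c rest ih => simp [bRanks, bRanksG, bRank_eq_G, ih]

theorem bRankG_le (c : String) (r v : Int) (ps : List String)
    (h : bRankG c r ps = some v) : v ≤ r := by
  induction ps generalizing r with
  | nil => simp [bRankG] at h
  | cons p ps ih =>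
    simp only [bRankG] at h
    split at h
    · cases h; omega
    · have := ih (r - 1) h; omega

theorem bRanksG_bound (r v : Int) (ps cats : List String)
    (h : v ∈ bRanksG r ps cats) : v ≤ r := by
  induction cats with
  | nil => simp [bRanksG] at h
  | cons c rest ih =>
    simp only [bRanksG] at h
    split at h
    · rcases List.mem_cons.mp h with h' | h'
      · subst h'; exact bRankG_le _ _ _ _ (by assumption)
      · exact ih h'
    · exact ih h

theorem aInner_false (cats : List String) (p : String)
    (h : aInner cats p = false) : ∀ c ∈ cats, PySem.Str.startswith c p = false := by
  induction cats with
  | nil => simp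
  | cons c rest ih =>
    intro x hx
    simp only [aInner] at h
    split at h
    · exact absurd h (by simp)
    · rcases List.mem_cons.mp hx with h' | h'
      · subst h'; simpa using ‹¬ PySem.Str.startswith x p = true›
      · exact ih h x h'

theorem bRanksG_mem (r : Int) (p : String) (ps cats : List String)
    (h : aInner cats p = true) : r ∈ bRanksG r (p :: ps) cats := by
  induction cats with
  | nil => simp [aInner] at h
  | cons c rest ih =>
    simp only [aInner] at h
    simp only [bRanksG, bRankG]
    by_cases hc : PySem.Str.startswith c p = true
    · have hc2 : PySem.Chars.startswith c.toList p.toList = true := by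
        simpa using hc
      simp [hc2]
    · rw [if_neg hc] at h ⊢
      have hr := ih h
      split <;> simp [hr]

theorem bRanksG_shift (r : Int) (p : String) (ps cats : List String)
    (h : ∀ c ∈ cats, PySem.Str.startswith c p = false) :
    bRanksG r (p :: ps) cats = bRanksG (r - 1) ps cats := by
  induction cats with
  | nil => rfl
  | cons c rest ih =>
    have hc : PySem.Str.startswith c p = false := h c (by simp)
    have hc2 : PySem.Chars.startswith c.toList p.toList = false := by
      simpa using hc
    have := ih (fun x hx => h x (List.mem_cons_of_mem _ hx))
    simp only [bRanksG, bRankG, hc, if_neg (Bool.false_ne_true), this]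

theorem main_lemma (ps : List String) : ∀ (r : Int) (cats : List String),
    aOuterG cats r ps =
      (match PySem.List.max? (bRanksG r ps cats) (fun x => x) with
       | some m => m
       | none => 1) := by
  induction ps with
  | nil =>
    intro r cats
    have hnil : bRanksG r [] cats = [] := by
      induction cats with
      | nil => rfl
      | cons c rest ih => simp [bRanksG, bRankG, ih]
    simp [aOuterG, hnil, PySem.List.max?]
  | cons p ps ih =>
    intro r cats
    simp only [aOuterG]
    by_cases h : aInner cats p = true
    · rw [if_pos h]
      have hmem := bRanksG_mem r p ps cats h
      rcases hm : PySem.List.max? (bRanksG r (p :: ps) cats) (fun x => x) with _ | m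
      · rw [PySem.List.max?_eq_none_iff] at hm
        rw [hm] at hmem; simp at hmem
      · have h1 : m ≤ r := bRanksG_bound r m (p :: ps) cats (PySem.List.max?_mem hm)
        have h2 : r ≤ m := PySem.List.max?_isMax hm r hmem
        simp; omega
    · rw [if_neg h]
      have hf := aInner_false cats p (by simpa using h)
      rw [bRanksG_shift r p ps cats hf]
      exact ih (r - 1) cats

-- ===== VERDICT (by name: the statement is the Claim_ definition above) =====
theorem get_category_priority_spec : Claim_equal_get_category_priority := by
  intro s _
  unfold Spec_get_category_priority get_category_priority get_category_priority_alt
  by_cases hs : s = ""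
  · simp [hs]
  · rw [if_neg hs, if_neg hs, aOuter_eq_G, bRanks_eq_G]
    exact main_lemma PRIORITY_CATEGORIES 8 (PySem.Str.split₀ s)
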